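-- pv_equiv track=rewrite | github.com/dbwpghks56/algo_practice | 2025-03-19/solution_29700.py | count_possible_seats
-- ===== SOURCE A (Python) =====
-- def count_possible_seats(N, M, K, seats):
--     count = 0  # 가능한 자리 개수
--
--     for row in seats:
--         available = 0  # 현재 윈도우 내 빈 좌석 개수
--
--         for right in range(M):  # 오른쪽 포인터 이동
--             if row[right] == '0':
--                 available += 1  # 빈 좌석 증가
--             else:
--                 available = 0  # 1을 만나면 초기화
--
--             # K개의 연속된 좌석이 확보되면 카운트
--             if available >= K:
--                 count += 1
--
--     return count
-- ===== SOURCE B (Python) =====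
-- def count_possible_seats(N, M, K, seats):
--     # Brute-force window test: for every position, check directly (via a slice)
--     # whether the K-seat window ending there is entirely empty; no running
--     # state is carried between positions.
--     total = 0
--     for row in seats:
--         for right in range(M):
--             if right >= K - 1 and all(c == '0' for c in row[right + 1 - K:right + 1]):
--                 total += 1
--     return total
-- ===== Notes on version B (the rewrite author's own statement) =====
-- stated objective: alternative
-- what changed: B replaces A's incremental sliding counter (a run length carried across positions, reset on occupied seats) with a stateless per-position brute-force check: each position is counted iff the K-seat slice ending there is entirely empty, trading O(M) per row for O(M*K).
import Mathlib
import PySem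

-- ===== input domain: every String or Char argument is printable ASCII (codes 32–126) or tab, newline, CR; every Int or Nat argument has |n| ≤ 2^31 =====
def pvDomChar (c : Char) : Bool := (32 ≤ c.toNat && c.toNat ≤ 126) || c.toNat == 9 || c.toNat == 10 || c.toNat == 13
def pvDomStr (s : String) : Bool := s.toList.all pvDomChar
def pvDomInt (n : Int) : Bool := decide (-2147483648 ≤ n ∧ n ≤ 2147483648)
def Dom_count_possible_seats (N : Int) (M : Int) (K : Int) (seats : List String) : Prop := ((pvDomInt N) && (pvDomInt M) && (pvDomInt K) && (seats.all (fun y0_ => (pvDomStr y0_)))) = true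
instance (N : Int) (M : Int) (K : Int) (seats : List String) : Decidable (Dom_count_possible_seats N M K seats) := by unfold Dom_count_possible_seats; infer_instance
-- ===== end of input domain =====

-- B counts each position by directly testing (via a slice) whether the K-seat window ending there is all empty, instead of A's running counter carried across positions; alternative decomposition, same purpose.


-- ===== PORT A =====
-- one step of A's inner loop: read row[right], update (available, count)
def aStep (K : Int) (row : List Char) (st : Int × Int) (right : Int) : Int × Int :=
  let available := if PySem.List.pyGetD row right ' ' == '0' then st.1 + 1 else 0
  (available, if K ≤ available then st.2 + 1 else st.2)

def count_possible_seats (N : Int) (M : Int) (K : Int) (seats : List String) : Int :=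
  seats.foldl (fun count row =>
    ((PySem.List.pyRange 0 M 1).foldl (aStep K row.toList) (0, count)).2) 0

-- ===== PORT B =====
-- one step of B's inner loop: count position `right` iff the window row[right+1-K : right+1] is all '0'
def bStep (K : Int) (row : List Char) (total : Int) (right : Int) : Int :=
  if K - 1 ≤ right ∧ (PySem.List.slice row (some (right + 1 - K)) (some (right + 1))).all (· == '0') = true
  then total + 1 else total

def count_possible_seats_alt (N : Int) (M : Int) (K : Int) (seats : List String) : Int :=
  seats.foldl (fun total row =>
    (PySem.List.pyRange 0 M 1).foldl (bStep K row.toList) total) 0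

-- ===== PRECONDITION & SPEC =====
-- Pre_ excludes exactly the inputs where A raises IndexError: 0 < M with some row shorter than M
def Pre_count_possible_seats (N : Int) (M : Int) (K : Int) (seats : List String) : Prop :=
  M ≤ 0 ∨ ∀ row ∈ seats, M ≤ (row.toList.length : Int)
instance (N : Int) (M : Int) (K : Int) (seats : List String) : Decidable (Pre_count_possible_seats N M K seats) := by unfold Pre_count_possible_seats; infer_instance

def pvWitness_count_possible_seats : Int × Int × Int × List String := (2, 3, 2, ["010", "000"])

def Spec_count_possible_seats (N : Int) (M : Int) (K : Int) (seats : List String) (out : Int) : Prop := out = count_possible_seats_alt N M K seats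
instance (N : Int) (M : Int) (K : Int) (seats : List String) (out : Int) : Decidable (Spec_count_possible_seats N M K seats out) := by unfold Spec_count_possible_seats; infer_instance

-- ===== CLAIM (what is proved, stated in full; the proofs are below) =====
def Claim_equal_count_possible_seats : Prop := ∀ (N : Int) (M : Int) (K : Int) (seats : List String), Dom_count_possible_seats N M K seats → Pre_count_possible_seats N M K seats → Spec_count_possible_seats N M K seats (count_possible_seats N M K seats)

-- ===== LEMMAS AND PROOFS =====

-- tz l = length of the maximal all-'0' suffix of l  (A's `available` after scanning l)
def tz (l : List Char) : Nat := (l.reverse.takeWhile (· == '0')).length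

theorem tz_append (l : List Char) (c : Char) :
    tz (l ++ [c]) = if c == '0' then tz l + 1 else 0 := by
  simp only [tz, List.reverse_append, List.reverse_singleton, List.singleton_append,
    List.takeWhile_cons]
  by_cases hc : c == '0' <;> simp [hc]

-- K' ≤ |takeWhile p l| ↔ the first K' elements all satisfy p (when K' ≤ |l|)
theorem le_takeWhile_iff {α : Type} (p : α → Bool) (l : List α) (k : Nat) (hk : k ≤ l.length) :
    k ≤ (l.takeWhile p).length ↔ (l.take k).all p = true := by
  induction l generalizing k with
  | nil =>
    have hk0 : k = 0 := by simpa using hk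
    subst hk0
    simp
  | cons x xs ih =>
    cases k with
    | zero => simp
    | succ k =>
      by_cases hx : p x = true
      · simp only [List.take_succ_cons, List.all_cons, List.takeWhile_cons_of_pos hx, hx,
          List.length_cons, Nat.add_le_add_iff_right, Bool.true_and]
        exact ih k (by simpa using hk)
      · simp [List.takeWhile_cons_of_neg hx, hx]

-- the bridge: A's test "run ending at n has length ≥ K" ⟺ B's test at position n
theorem key (K : Int) (row : List Char) (n : Nat) (hn : n < row.length) :
    (K ≤ (tz (row.take (n + 1)) : Int)) ↔
      (K - 1 ≤ (n : Int) ∧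
        (PySem.List.slice row (some ((n : Int) + 1 - K)) (some ((n : Int) + 1))).all (· == '0') = true) := by
  rcases le_or_gt K 0 with hK | hK
  · -- K ≤ 0: both sides trivially true (the window is empty)
    have hs : PySem.List.slice row (some ((n : Int) + 1 - K)) (some ((n : Int) + 1)) = [] := by
      rw [PySem.List.slice_toNat row (by omega) (by omega)]
      have h0 : ((n : Int) + 1).toNat - ((n : Int) + 1 - K).toNat = 0 := by omega
      rw [h0]
      simp
    constructor
    · intro _; exact ⟨by omega, by simp [hs]⟩
    · intro _; have := Int.natCast_nonneg (tz (row.take (n + 1))); omega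
  · -- 1 ≤ K
    rcases le_or_gt K ((n : Int) + 1) with hKn | hKn
    · -- the window fits: K - 1 ≤ n
      have hk1 : K.toNat ≤ n + 1 := by omega
      set l := row.take (n + 1) with hl
      have hlen : l.length = n + 1 := by rw [hl, List.length_take]; omega
      have hslice : PySem.List.slice row (some ((n : Int) + 1 - K)) (some ((n : Int) + 1))
          = l.drop (n + 1 - K.toNat) := by
        rw [hl, PySem.List.slice_toNat row (by omega) (by omega)]
        have e1 : ((n : Int) + 1 - K).toNat = n + 1 - K.toNat := by omega
        have e2 : ((n : Int) + 1).toNat = n + 1 := by omega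
        rw [e1, e2, List.drop_take]
      have hrev : l.reverse.take K.toNat = (l.drop (n + 1 - K.toNat)).reverse := by
        rw [List.take_reverse, hlen]
      constructor
      · intro h
        refine ⟨by omega, ?_⟩
        rw [hslice]
        have h1 : K.toNat ≤ (l.reverse.takeWhile (· == '0')).length := by
          simp only [tz] at h; omega
        have := (le_takeWhile_iff (· == '0') l.reverse K.toNat (by simp [hlen]; omega)).mp h1
        rw [hrev] at this
        simpa using this
      · rintro ⟨-, h⟩
        rw [hslice] at h
        have h2 : (l.reverse.take K.toNat).all (· == '0') = true := by
          rw [hrev]; simpa using h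
        have := (le_takeWhile_iff (· == '0') l.reverse K.toNat (by simp [hlen]; omega)).mpr h2
        simp only [tz]; omega
    · -- K > n + 1: the run can't be long enough, and the window doesn't fit
      have hlen : (row.take (n + 1)).length = n + 1 := by simp; omega
      have h1 : tz (row.take (n + 1)) ≤ n + 1 := by
        have := ((row.take (n + 1)).reverse.takeWhile_sublist (· == '0')).length_le
        simp only [tz]
        simp only [List.length_reverse, hlen] at this
        omega
      constructor
      · intro h; omega
      · rintro ⟨h, -⟩; omega

-- per-row invariant: after scanning positions 0..n-1 of the row, A's state is
-- (run length ending at n, its count), and A and B have added the same amount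
theorem rowInv (K : Int) (row : List Char) (n : Nat) (hn : n ≤ row.length) (c t : Int) :
    ((PySem.List.pyRange 0 (n : Int) 1).foldl (aStep K row) (0, c)).1 = (tz (row.take n) : Int)
  ∧ ((PySem.List.pyRange 0 (n : Int) 1).foldl (aStep K row) (0, c)).2 - c
      = (PySem.List.pyRange 0 (n : Int) 1).foldl (bStep K row) t - t := by
  induction n with
  | zero => simp [PySem.List.pyRange_one_eq_nil (by omega : (0:Int) ≤ 0), tz]
  | succ n ih =>
    have hn' : n ≤ row.length := by omega
    have hsplit : PySem.List.pyRange 0 ((n : Int) + 1) 1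
        = PySem.List.pyRange 0 (n : Int) 1 ++ [(n : Int)] := by
      rw [PySem.List.pyRange_one_succ_right (by omega)]
    obtain ⟨h1, h2⟩ := ih hn'
    have hget : PySem.List.pyGetD row (n : Int) ' ' = row[n]'(by omega) :=
      PySem.List.pyGetD_eq_getElem row ' ' (by omega) (by exact_mod_cast by omega)
    have htake : row.take (n + 1) = row.take n ++ [row[n]'(by omega)] := by
      rw [List.take_add_one]
      simp [List.getElem?_eq_getElem (by omega : n < row.length)]
    have hkey := key K row n (by omega)
    push_cast [hsplit, List.foldl_append]
    constructor
    · simp only [List.foldl_cons, List.foldl_nil, aStep, hget, h1, htake, tz_append]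
      by_cases hc : row[n]'(by omega) == '0' <;> simp [hc]
    · simp only [List.foldl_cons, List.foldl_nil, aStep, bStep, hget, h1]
      rw [htake, tz_append] at hkey
      by_cases hc : (row[n]'(by omega)) == '0'
      · rw [if_pos hc] at hkey ⊢
        push_cast at hkey
        by_cases hA : K ≤ (tz (row.take n) : Int) + 1
        · rw [if_pos hA, if_pos (hkey.mp hA)]; omega
        · rw [if_neg hA, if_neg (fun h => hA (hkey.mpr h))]; omega
      · simp only [hc, Bool.false_eq_true, if_false] at hkey ⊢
        by_cases hA : K ≤ (0 : Int)
        · rw [if_pos hA, if_pos (hkey.mp hA)]; omega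
        · rw [if_neg hA, if_neg (fun h => hA (hkey.mpr h))]; omega

-- ===== VERDICT (by name: the statement is the Claim_ definition above) =====
theorem count_possible_seats_spec : Claim_equal_count_possible_seats := by
  unfold Claim_equal_count_possible_seats
  intro N M K seats _hDom hPre
  unfold Spec_count_possible_seats count_possible_seats count_possible_seats_alt
  have hall : ∀ row ∈ seats, M ≤ 0 ∨ M ≤ (row.toList.length : Int) := by
    rcases hPre with h | h
    · intro row _; exact Or.inl h
    · intro row hr; exact Or.inr (h row hr)
  have main : ∀ (ss : List String) (c t : Int),
      (∀ row ∈ ss, M ≤ 0 ∨ M ≤ (row.toList.length : Int)) →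
      ss.foldl (fun count row =>
          ((PySem.List.pyRange 0 M 1).foldl (aStep K row.toList) (0, count)).2) c - c
        = ss.foldl (fun total row =>
            (PySem.List.pyRange 0 M 1).foldl (bStep K row.toList) total) t - t := by
    intro ss
    induction ss with
    | nil => intro c t _; simp
    | cons row ss ih =>
      intro c t hallr
      simp only [List.foldl_cons]
      have hrow : ((PySem.List.pyRange 0 M 1).foldl (aStep K row.toList) (0, c)).2 - c
          = (PySem.List.pyRange 0 M 1).foldl (bStep K row.toList) t - t := by
        rcases le_or_gt M 0 with hM | hM
        · rw [PySem.List.pyRange_one_eq_nil hM]; simp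
        · have hlen : M ≤ (row.toList.length : Int) := by
            rcases hallr row (by simp) with h | h
            · omega
            · exact h
          have hMn : M = ((M.toNat : Nat) : Int) := by omega
          rw [hMn]
          exact (rowInv K row.toList M.toNat (by omega) c t).2
      have := ih (((PySem.List.pyRange 0 M 1).foldl (aStep K row.toList) (0, c)).2)
        ((PySem.List.pyRange 0 M 1).foldl (bStep K row.toList) t)
        (fun r hr => hallr r (by simp [hr]))
      omega
  have := main seats 0 0 hall
  omega
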